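-- pv_equiv track=rewrite | github.com/ishandutta2007/codeforces | komendart/normal/611/B.py | f
-- ===== SOURCE A (Python) =====
-- def f(x):
--     res = 0
--     for i in range(64):
--         for j in range(i + 1, 64):
--             t = 0
--             for k in range(j + 1):
--                 if k != i:
--                     t += 1 << k
--             if t <= x:
--                 res += 1
--     return res
-- ===== SOURCE B (Python) =====
-- def f(x):
--     # count pairs i < j < 64 with ((1 << (j+1)) - 1) - (1 << i) <= x, one j at a time
--     res = 0
--     for j in range(1, 64):
--         need = (1 << (j + 1)) - 1 - x  # count i in [0, j) with (1 << i) >= need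
--         if need <= 1:
--             res += j
--         else:
--             lo = (need - 1).bit_length()  # smallest i with (1 << i) >= need
--             if lo < j:
--                 res += j - lo
--     return res
-- ===== Notes on version B (the rewrite author's own statement) =====
-- stated objective: faster
-- what changed: Replaces the triple loop (pairs (i,j) with an inner bit-summation loop rebuilding t) by a single pass over j that computes the threshold need = 2^(j+1)-1-x and counts all qualifying i at once with bit_length.
import Mathlib
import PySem

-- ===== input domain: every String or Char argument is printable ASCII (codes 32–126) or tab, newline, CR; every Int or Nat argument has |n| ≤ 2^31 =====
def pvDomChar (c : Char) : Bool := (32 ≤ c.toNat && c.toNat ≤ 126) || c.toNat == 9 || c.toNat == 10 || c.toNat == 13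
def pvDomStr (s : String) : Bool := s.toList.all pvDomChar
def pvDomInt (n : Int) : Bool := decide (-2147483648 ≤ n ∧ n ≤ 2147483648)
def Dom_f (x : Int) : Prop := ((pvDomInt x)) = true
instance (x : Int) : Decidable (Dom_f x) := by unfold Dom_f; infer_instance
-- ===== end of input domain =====

-- B replaces A's O(64^3) triple loop by a single O(64) pass over j, counting the
-- qualifying i per j in closed form via bit_length (objective: faster).

-- ===== PORT A =====
def f (x : Int) : Int :=
  (PySem.List.pyRange 0 64 1).foldl (fun res i =>
    (PySem.List.pyRange (i + 1) 64 1).foldl (fun res j =>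
      let t := (PySem.List.pyRange 0 (j + 1) 1).foldl
        (fun t k => if k ≠ i then t + ((1 <<< k.toNat : Nat) : Int) else t) 0
      if t ≤ x then res + 1 else res) res) 0


-- ===== PORT B =====
def f_alt (x : Int) : Int :=
  (PySem.List.pyRange 1 64 1).foldl (fun res j =>
    let need := ((1 <<< (j + 1).toNat : Nat) : Int) - 1 - x
    if need ≤ 1 then res + j
    else
      let lo : Int := PySem.Int.bitLength (need - 1)
      if lo < j then res + (j - lo) else res) 0


-- ===== PRECONDITION & SPEC =====
def Spec_f (x : Int) (out : Int) : Prop := out = f_alt x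
instance (x : Int) (out : Int) : Decidable (Spec_f x out) := by unfold Spec_f; infer_instance

-- ===== CLAIM (what is proved, stated in full; the proofs are below) =====
def Claim_equal_f : Prop := ∀ (x : Int), Dom_f x → Spec_f x (f x)

-- ===== LEMMAS AND PROOFS =====

-- t-value of the pair (i, j) and its 0/1 indicator
def pvT (i j : Nat) : Int := 2 ^ (j + 1) - 1 - 2 ^ i
def pvInd (x : Int) (i j : Nat) : Int := if pvT i j ≤ x then 1 else 0

-- additive fold over a Python range as a Finset sum
theorem pvFoldAdd (a b : Int) (F : Int → Int) (c : Int) :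
    (PySem.List.pyRange a b 1).foldl (fun acc t => acc + F t) c
      = c + ∑ k ∈ Finset.range (b - a).toNat, F (a + k) := by
  rw [PySem.List.foldl_add, PySem.List.pyRange_one, List.map_map]
  rfl

-- A's innermost loop computes 2^n - 1 minus 2^i when 0 ≤ i < n
theorem pvA_inner (i : Int) (n : Nat) :
    (PySem.List.pyRange 0 (n : Int) 1).foldl
        (fun t k => if k ≠ i then t + ((1 <<< k.toNat : Nat) : Int) else t) 0
      = (2 ^ n - 1) - (if 0 ≤ i ∧ i < (n : Int) then 2 ^ i.toNat else 0) := by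
  induction n with
  | zero =>
      rw [PySem.List.pyRange_one_eq_nil (by omega)]
      simp
  | succ n ih =>
      have h : ((n + 1 : Nat) : Int) = (n : Int) + 1 := by push_cast; ring
      rw [h, PySem.List.pyRange_one_succ_right (by positivity), List.foldl_append, ih]
      simp only [List.foldl]
      have hp : (2:Int) ^ (n + 1) = 2 ^ n * 2 := pow_succ 2 n
      by_cases hi : (n : Int) = i
      · subst hi
        have h1 : ¬ ((0:Int) ≤ (n:Int) ∧ (n:Int) < (n:Int)) := by omega
        have h2 : ((0:Int) ≤ (n:Int) ∧ (n:Int) < (n:Int) + 1) := by omega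
        simp [h2, Int.toNat_natCast, hp]
        linarith
      · by_cases hc : (0:Int) ≤ i ∧ i < (n : Int)
        · have hc' : (0:Int) ≤ i ∧ i < (n : Int) + 1 := by omega
          simp [hi, hc, hc', Nat.one_shiftLeft, Int.toNat_natCast, hp]
          linarith
        · have hc'' : ¬ ((0:Int) ≤ i ∧ i ≤ (n : Int)) := by omega
          simp [hi, hc, hc'', Nat.one_shiftLeft, Int.toNat_natCast, hp]
          linarith

-- B's per-j count: closed form equals the number of i < j with pvT i j ≤ x
theorem pvB_count (x : Int) (j : Nat) :
    (let need := (2 ^ (j + 1) : Int) - 1 - x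
     if need ≤ 1 then (j : Int)
     else if (PySem.Int.bitLength (need - 1) : Int) < (j : Int)
          then (j : Int) - (PySem.Int.bitLength (need - 1) : Int) else 0)
      = ∑ i ∈ Finset.range j, pvInd x i j := by
  set need : Int := 2 ^ (j + 1) - 1 - x with hneed
  have hind : ∀ i : Nat, pvInd x i j = if need ≤ 2 ^ i then 1 else 0 := by
    intro i
    unfold pvInd pvT
    have : (2:Int) ^ (j + 1) - 1 - 2 ^ i ≤ x ↔ need ≤ 2 ^ i := by omega
    simp [this]
  by_cases h1 : need ≤ 1
  · have : ∀ i ∈ Finset.range j, pvInd x i j = 1 := by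
      intro i _
      rw [hind]
      have : (1:Int) ≤ 2 ^ i := one_le_pow₀ (by norm_num)
      simp; omega
    rw [Finset.sum_congr rfl this]
    simp [h1]
  · -- 2 ≤ need
    set lo : Nat := PySem.Int.bitLength (need - 1) with hlo
    have hn1 : (1:Int) ≤ need - 1 := by omega
    have hub : need - 1 < 2 ^ lo := by
      have h := PySem.Int.lt_two_pow_bitLength (need - 1)
      have e : ((need - 1).natAbs : Int) = need - 1 := Int.natAbs_of_nonneg (by omega)
      calc need - 1 = ((need - 1).natAbs : Int) := e.symm
        _ < ((2 ^ lo : Nat) : Int) := by exact_mod_cast h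
        _ = 2 ^ lo := by push_cast; ring
    have hlo1 : 1 ≤ lo := by
      by_contra hc
      have : lo = 0 := by omega
      rw [this] at hub
      simp at hub; omega
    have hlb : (2:Int) ^ (lo - 1) ≤ need - 1 := by
      have h := PySem.Int.two_pow_bitLength_le (need - 1) (by omega)
      have e : ((need - 1).natAbs : Int) = need - 1 := Int.natAbs_of_nonneg (by omega)
      calc (2:Int) ^ (lo - 1) = ((2 ^ (lo - 1) : Nat) : Int) := by push_cast; ring
        _ ≤ ((need - 1).natAbs : Int) := by exact_mod_cast h
        _ = need - 1 := e
    have hiff : ∀ i : Nat, (need ≤ 2 ^ i ↔ lo ≤ i) := by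
      intro i
      constructor
      · intro h
        by_contra hc
        have hi : i ≤ lo - 1 := by omega
        have : (2:Int) ^ i ≤ 2 ^ (lo - 1) :=
          pow_le_pow_right₀ (by norm_num) hi
        omega
      · intro h
        have : (2:Int) ^ lo ≤ 2 ^ i := pow_le_pow_right₀ (by norm_num) h
        omega
    have : ∀ i ∈ Finset.range j, pvInd x i j = if lo ≤ i then (1:Int) else 0 := by
      intro i _
      rw [hind]
      by_cases hc : lo ≤ i
      · simp [hc, (hiff i).2 hc]
      · have : ¬ need ≤ 2 ^ i := fun h => hc ((hiff i).1 h)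
        simp [hc, this]
    rw [Finset.sum_congr rfl this]
    have hfilter : (Finset.range j).filter (fun i => lo ≤ i) = Finset.Ico lo j := by
      ext i; simp [Finset.mem_filter, Finset.mem_Ico]; omega
    have hsum : ∑ i ∈ Finset.range j, (if lo ≤ i then (1:Int) else 0)
        = (((Finset.range j).filter (fun i => lo ≤ i)).card : Int) := by
      rw [Finset.sum_ite, Finset.sum_const, Finset.sum_const]
      simp
    rw [hsum, hfilter, Nat.card_Ico]
    by_cases hj : (PySem.Int.bitLength (need - 1) : Int) < (j : Int)
    · have hlt : lo < j := by simpa [hlo] using (by exact_mod_cast hj : (lo:Int) < (j:Int))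
      simp [h1, hj]
      push_cast [Nat.cast_sub (le_of_lt hlt)]
      ring
    · have hge : j ≤ lo := by
        have : (j:Int) ≤ (lo:Int) := by push_cast at hj ⊢; omega
        exact_mod_cast this
      have : j - lo = 0 := by omega
      simp [h1, hj, this]

-- A's middle loop (fixed i = ii < 64) counts qualifying j > ii
theorem pvA_mid (x : Int) (ii : Nat) (res : Int) (hii : ii < 64) :
    (PySem.List.pyRange ((ii : Int) + 1) 64 1).foldl (fun res j =>
        let t := (PySem.List.pyRange 0 (j + 1) 1).foldl
          (fun t k => if k ≠ (ii : Int) then t + ((1 <<< k.toNat : Nat) : Int) else t) 0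
        if t ≤ x then res + 1 else res) res
      = res + ∑ j ∈ Finset.Ico (ii + 1) 64, pvInd x ii j := by
  refine (PySem.List.foldl_congr_mem'
      _ _ (fun res j => res + pvInd x ii j.toNat) _ ?_).trans ?_
  · -- the loop body, on members of the range, is the additive body
    intro j hj res
    have hj' := (PySem.List.mem_pyRange_one).1 hj
    obtain ⟨jj, rfl⟩ : ∃ jj : Nat, j = (jj : Int) := ⟨j.toNat, by omega⟩
    have h1 : ((jj : Int)) + 1 = ((jj + 1 : Nat) : Int) := by push_cast; ring
    have hcond : (0 : Int) ≤ (ii : Int) ∧ (ii : Int) < ((jj + 1 : Nat) : Int) := by omega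
    simp only [h1, pvA_inner, if_pos hcond, Int.toNat_natCast, pvInd, pvT]
    split_ifs <;> ring
  · -- fold of the additive body equals the Finset sum
    rw [pvFoldAdd]
    congr 1
    rw [Finset.sum_Ico_eq_sum_range]
    have hn : ((64 : Int) - ((ii : Int) + 1)).toNat = 64 - (ii + 1) := by omega
    rw [hn]
    apply Finset.sum_congr rfl
    intro k _
    have hk : ((ii : Int) + 1 + (k : Int)).toNat = ii + 1 + k := by omega
    rw [hk]

-- A's result as a double sum
theorem pvA_sum (x : Int) :
    f x = ∑ i ∈ Finset.range 64, ∑ j ∈ Finset.Ico (i + 1) 64, pvInd x i j := by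
  unfold f
  refine (PySem.List.foldl_congr_mem'
      _ _ (fun res i => res + ∑ j ∈ Finset.Ico (i.toNat + 1) 64, pvInd x i.toNat j) _ ?_).trans ?_
  · intro i hi res
    have hi' := (PySem.List.mem_pyRange_one).1 hi
    obtain ⟨ii, rfl⟩ : ∃ ii : Nat, i = (ii : Int) := ⟨i.toNat, by omega⟩
    simp only [Int.toNat_natCast]
    exact pvA_mid x ii res (by exact_mod_cast hi'.2)
  · rw [pvFoldAdd]
    simp only [zero_add]
    apply Finset.sum_congr (by decide)
    intro k _
    simp only [Int.toNat_natCast]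

-- B's result as a double sum
theorem pvB_sum (x : Int) :
    f_alt x = ∑ j ∈ Finset.Ico 1 64, ∑ i ∈ Finset.range j, pvInd x i j := by
  unfold f_alt
  refine (PySem.List.foldl_congr_mem'
      _ _ (fun res j => res + ∑ i ∈ Finset.range j.toNat, pvInd x i j.toNat) _ ?_).trans ?_
  · intro j hj res
    have hj' := (PySem.List.mem_pyRange_one).1 hj
    obtain ⟨jj, rfl⟩ : ∃ jj : Nat, j = (jj : Int) := ⟨j.toNat, by omega⟩
    have h1 : ((jj : Int) + 1).toNat = jj + 1 := by omega
    have hsh : (((1 <<< (jj + 1) : Nat) : Nat) : Int) = 2 ^ (jj + 1) := by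
      simp [Nat.one_shiftLeft]
    simp only [h1]
    simp only [hsh, Int.toNat_natCast]
    rw [← pvB_count x jj]
    simp only []
    split_ifs <;> ring
  · rw [pvFoldAdd]
    try simp only [zero_add]
    rw [Finset.sum_Ico_eq_sum_range]
    apply Finset.sum_congr (by decide)
    intro k _
    have hk : ((1 : Int) + (k : Int)).toNat = 1 + k := by omega
    rw [hk]

-- exchanging the two orders of summation over the pairs i < j < 64
theorem pvSwap (x : Int) :
    ∑ i ∈ Finset.range 64, ∑ j ∈ Finset.Ico (i + 1) 64, pvInd x i j
      = ∑ j ∈ Finset.Ico 1 64, ∑ i ∈ Finset.range j, pvInd x i j := by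
  have hL : ∀ i : Nat, i < 64 →
      ∑ j ∈ Finset.Ico (i + 1) 64, pvInd x i j
        = ∑ j ∈ Finset.range 64, if i + 1 ≤ j then pvInd x i j else 0 := by
    intro i _
    rw [← Finset.sum_filter]
    apply Finset.sum_congr
    · ext j; simp [Finset.mem_Ico, Finset.mem_filter, Finset.mem_range]; omega
    · intro j _; rfl
  have hR : ∀ j : Nat, j < 64 →
      ∑ i ∈ Finset.range j, pvInd x i j
        = ∑ i ∈ Finset.range 64, if i + 1 ≤ j then pvInd x i j else 0 := by
    intro j hj
    rw [← Finset.sum_filter]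
    apply Finset.sum_congr
    · ext i; simp [Finset.mem_filter, Finset.mem_range]; omega
    · intro i _; rfl
  calc ∑ i ∈ Finset.range 64, ∑ j ∈ Finset.Ico (i + 1) 64, pvInd x i j
      = ∑ i ∈ Finset.range 64, ∑ j ∈ Finset.range 64, if i + 1 ≤ j then pvInd x i j else 0 := by
        apply Finset.sum_congr rfl
        intro i hi
        exact hL i (Finset.mem_range.1 hi)
    _ = ∑ j ∈ Finset.range 64, ∑ i ∈ Finset.range 64, if i + 1 ≤ j then pvInd x i j else 0 :=
        Finset.sum_comm
    _ = ∑ j ∈ Finset.Ico 1 64, ∑ i ∈ Finset.range j, pvInd x i j := by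
        rw [show Finset.Ico 1 64 = (Finset.range 64).filter (fun j => 1 ≤ j) by
          ext j; simp [Finset.mem_Ico, Finset.mem_filter, Finset.mem_range]; omega]
        rw [Finset.sum_filter]
        apply Finset.sum_congr rfl
        intro j hj
        by_cases h1 : 1 ≤ j
        · rw [if_pos h1, hR j (Finset.mem_range.1 hj)]
        · have : j = 0 := by omega
          subst this
          simp

theorem pvMain (x : Int) : f x = f_alt x := by
  rw [pvA_sum, pvSwap, ← pvB_sum]

-- ===== VERDICT (by name: the statement is the Claim_ definition above) =====
theorem f_spec : Claim_equal_f := by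
  intro x _
  unfold Spec_f
  exact pvMain x
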